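-- pv_equiv track=rewrite | github.com/readjfb/AdventOfCode-2025 | day2/day2.py | check_invalid
-- ===== SOURCE A (Python) =====
-- def check_invalid(s, n_splits=2):
--     if len(s) % n_splits != 0:
--         return False
--
--     split_len = len(s) // n_splits
--
--     first = s[:split_len]
--
--     for i in range(n_splits):
--         start = i * split_len
--         end = (i + 1) * split_len
--
--         if first != s[start:end]:
--             return False
--
--     return True
-- ===== SOURCE B (Python) =====
-- def check_invalid(s, n_splits=2):
--     if len(s) % n_splits != 0:
--         return False
--     split_len = len(s) // n_splits
--     return s[split_len:] == s[:len(s) - split_len]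
-- ===== Notes on version B (the rewrite author's own statement) =====
-- stated objective: alternative
-- what changed: Replaces the loop comparing every chunk against the first by a single self-overlap (periodicity) test: s consists of n equal chunks iff s[split_len:] == s[:len(s)-split_len].
-- intended difference: For n_splits <= -2 with non-empty s whose length is divisible by n_splits, A returns True because its for-loop over range(n_splits) is empty, although a string cannot be -2 equal chunks; B returns False, the intended answer. — e.g. on check_invalid("abcd", -2): A returns true, B returns false
import Mathlib
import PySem

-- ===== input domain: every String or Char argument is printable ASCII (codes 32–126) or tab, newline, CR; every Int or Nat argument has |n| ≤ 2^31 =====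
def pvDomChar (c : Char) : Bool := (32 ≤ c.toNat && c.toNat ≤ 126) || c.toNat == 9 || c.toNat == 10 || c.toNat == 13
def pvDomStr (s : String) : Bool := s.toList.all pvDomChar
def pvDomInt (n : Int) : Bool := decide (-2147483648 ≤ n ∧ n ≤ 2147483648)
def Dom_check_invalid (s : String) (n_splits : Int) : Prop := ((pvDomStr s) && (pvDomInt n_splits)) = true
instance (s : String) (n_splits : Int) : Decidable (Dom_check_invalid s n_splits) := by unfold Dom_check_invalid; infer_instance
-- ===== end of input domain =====

-- B replaces A's loop comparing every chunk against the first by a single self-overlap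
-- (periodicity) test  s[split_len:] == s[:len(s)-split_len]  (alternative algorithm, same cost).
-- On n_splits ≤ -2 with non-empty s of divisible length, A's empty loop returns True; B returns False (see D_).

-- ===== PORT A =====
-- the for-loop over range(n_splits) with its early 'return False'
def checkInvalidLoopA (cs first : List Char) (split_len : Int) : List Int → Bool
  | [] => true
  | i :: rest =>
    let start := i * split_len
    let stop := (i + 1) * split_len
    if first ≠ PySem.List.slice cs (some start) (some stop) then false
    else checkInvalidLoopA cs first split_len rest

def check_invalid (s : String) (n_splits : Int) : Bool :=
  if PySem.Int.mod (PySem.Str.len s) n_splits ≠ 0 then false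
  else
    let split_len := PySem.Int.floordiv (PySem.Str.len s) n_splits
    let first := PySem.List.slice s.toList none (some split_len)
    checkInvalidLoopA s.toList first split_len (PySem.List.pyRange 0 n_splits 1)

-- ===== PORT B =====
def check_invalid_alt (s : String) (n_splits : Int) : Bool :=
  if PySem.Int.mod (PySem.Str.len s) n_splits ≠ 0 then false
  else
    let split_len := PySem.Int.floordiv (PySem.Str.len s) n_splits
    PySem.List.slice s.toList (some split_len) none
      == PySem.List.slice s.toList none (some (PySem.Str.len s - split_len))

-- ===== PRECONDITION & SPEC =====
-- Pre_ excludes only n_splits = 0, where A raises ZeroDivisionError in the modulus guard.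
def Pre_check_invalid (_s : String) (n_splits : Int) : Prop := n_splits ≠ 0
instance (s : String) (n_splits : Int) : Decidable (Pre_check_invalid s n_splits) := by
  unfold Pre_check_invalid; infer_instance
def pvWitness_check_invalid : String × Int := ("abab", 2)

-- For n_splits ≤ -2 with non-empty s whose length is divisible by n_splits, A returns True
-- (its for-loop over range(n_splits) is empty), although a string cannot be that many equal
-- chunks; B returns False, the intended answer.
def D_check_invalid (s : String) (n_splits : Int) : Prop :=
  n_splits < -1 ∧ 0 < PySem.Str.len s ∧ PySem.Int.mod (PySem.Str.len s) n_splits = 0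
instance (s : String) (n_splits : Int) : Decidable (D_check_invalid s n_splits) := by
  unfold D_check_invalid; infer_instance

def Spec_check_invalid (s : String) (n_splits : Int) (out : Bool) : Prop :=
  ¬ D_check_invalid s n_splits → out = check_invalid_alt s n_splits
instance (s : String) (n_splits : Int) (out : Bool) : Decidable (Spec_check_invalid s n_splits out) := by unfold Spec_check_invalid; infer_instance

def pvDiffWitness_check_invalid : String × Int := ("abcd", -2)
def pvDiffWitnessOut_check_invalid : Bool × Bool := (true, false)

-- ===== CLAIM (what is proved, stated in full; the proofs are below) =====
def Claim_unchanged_check_invalid : Prop := ∀ (s : String) (n_splits : Int), Dom_check_invalid s n_splits → Pre_check_invalid s n_splits → Spec_check_invalid s n_splits (check_invalid s n_splits)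
def Claim_changed_check_invalid : Prop := Dom_check_invalid (pvDiffWitness_check_invalid.1) (pvDiffWitness_check_invalid.2) ∧ Pre_check_invalid (pvDiffWitness_check_invalid.1) (pvDiffWitness_check_invalid.2) ∧ D_check_invalid (pvDiffWitness_check_invalid.1) (pvDiffWitness_check_invalid.2) ∧ check_invalid (pvDiffWitness_check_invalid.1) (pvDiffWitness_check_invalid.2) = pvDiffWitnessOut_check_invalid.1 ∧ check_invalid_alt (pvDiffWitness_check_invalid.1) (pvDiffWitness_check_invalid.2) = pvDiffWitnessOut_check_invalid.2 ∧ pvDiffWitnessOut_check_invalid.1 ≠ pvDiffWitnessOut_check_invalid.2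
def Claim_exact_check_invalid : Prop := ∀ (s : String) (n_splits : Int), Dom_check_invalid s n_splits → Pre_check_invalid s n_splits → D_check_invalid s n_splits → check_invalid s n_splits ≠ check_invalid_alt s n_splits

-- ===== LEMMAS AND PROOFS =====

theorem checkInvalidLoopA_eq_all (cs first : List Char) (sl : Int) (is : List Int) :
    checkInvalidLoopA cs first sl is
      = is.all (fun i => first == PySem.List.slice cs (some (i * sl)) (some ((i + 1) * sl))) := by
  induction is with
  | nil => rfl
  | cons i rest ih =>
    simp only [checkInvalidLoopA, List.all_cons]
    rw [ih]
    by_cases h : first = PySem.List.slice cs (some (i * sl)) (some ((i + 1) * sl))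
    · simp [h]
    · simp [h]

theorem chunk_elem (cs : List Char) (l : Nat)
    (per : ∀ j, l + j < cs.length → cs[l + j]? = cs[j]?) :
    ∀ i r, r < l → (i + 1) * l ≤ cs.length → cs[i * l + r]? = cs[r]? := by
  intro i
  induction i with
  | zero => intro r _ _; simp
  | succ i ih =>
    intro r hr h2
    have hidx : (i + 1) * l + r = l + (i * l + r) := by ring
    rw [hidx, per _ (by nlinarith), ih r hr (by nlinarith)]

theorem chunks_iff_overlap (cs : List Char) (l nn : Nat) (hM : cs.length = nn * l)
    (hnn : 1 ≤ nn) :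
    (∀ i < nn, (cs.drop (i * l)).take l = cs.take l)
      ↔ cs.drop l = cs.take (cs.length - l) := by
  have hlM : l ≤ cs.length := by rw [hM]; nlinarith
  constructor
  · intro hch
    apply List.ext_getElem?_iff.mpr
    intro j
    rw [List.getElem?_drop]
    by_cases hj : j < cs.length - l
    · rw [List.getElem?_take_of_lt hj]
      rcases Nat.eq_zero_or_pos l with hl0 | hl
      · subst hl0; rw [Nat.mul_zero] at hM; omega
      · set q := j / l with hq
        set r := j % l with hr
        have hrl : r < l := Nat.mod_lt _ hl
        have hjd : q * l + r = j := by rw [hq, hr, Nat.mul_comm]; exact Nat.div_add_mod j l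
        have hsub : cs.length - l = (nn - 1) * l := by
          rw [hM, Nat.sub_mul, one_mul]
        have hqlt : q < nn - 1 := (Nat.div_lt_iff_lt_mul hl).mpr (by omega)
        have e1 : cs[j]? = cs[r]? := by
          have := congrArg (fun t => t[r]?) (hch q (by omega))
          simpa [List.getElem?_take_of_lt hrl, List.getElem?_drop, hjd] using this
        have e2 : cs[l + j]? = cs[r]? := by
          have := congrArg (fun t => t[r]?) (hch (q + 1) (by omega))
          have hidx : (q + 1) * l + r = l + j := by rw [← hjd]; ring
          simpa [List.getElem?_take_of_lt hrl, List.getElem?_drop, hidx] using this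
        rw [e1, e2]
    · rw [List.getElem?_eq_none (show cs.length ≤ l + j by omega),
        List.getElem?_eq_none (by simp; omega)]
  · intro hov
    have per : ∀ j, l + j < cs.length → cs[l + j]? = cs[j]? := by
      intro j hj
      have := congrArg (fun t => t[j]?) hov
      simpa [List.getElem?_drop, List.getElem?_take_of_lt (show j < cs.length - l by omega)] using this
    intro i hi
    apply List.ext_getElem?_iff.mpr
    intro r
    by_cases hrl : r < l
    · rw [List.getElem?_take_of_lt hrl, List.getElem?_take_of_lt hrl, List.getElem?_drop]
      exact chunk_elem cs l per i r hrl (by rw [hM]; nlinarith)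
    · rw [List.getElem?_eq_none (by simp; omega), List.getElem?_eq_none (by simp; omega)]

theorem check_invalid_ne_alt_on_D (s : String) (n : Int)
    (hD : D_check_invalid s n) :
    check_invalid s n = true ∧ check_invalid_alt s n = false := by
  obtain ⟨hn, hm, hmod⟩ := hD
  have hmM : PySem.Str.len s = (s.toList.length : Int) := PySem.Str.len_eq s
  set cs := s.toList with hcs
  set M := cs.length with hMdef
  set L := PySem.Int.floordiv (PySem.Str.len s) n with hL
  have hLn : L * n + 0 = PySem.Str.len s := by
    rw [← hmod, hL]; exact PySem.Int.floordiv_mul_add_mod _ n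
  have hLneg : L ≤ -1 := by nlinarith
  have h2L : 2 * (-L) ≤ (M : Int) := by nlinarith
  have hM1 : 0 < (M : Int) := by omega
  set k := (-L).toNat with hk
  have hkL : L = -(k : Int) := by omega
  have hk1 : 1 ≤ k := by omega
  have hkM : k < M := by omega
  constructor
  · unfold check_invalid
    rw [if_neg (by simpa using hmod)]
    show checkInvalidLoopA cs _ _ (PySem.List.pyRange 0 n 1) = true
    rw [PySem.List.pyRange_one_eq_nil (by omega)]
    rfl
  · unfold check_invalid_alt
    rw [if_neg (by simpa using hmod)]
    show (PySem.List.slice cs (some L) none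
      == PySem.List.slice cs none (some (PySem.Str.len s - L))) = false
    rw [hkL, PySem.List.slice_from_neg_natCast cs k (by omega)]
    have hbig : (M : Int) ≤ PySem.Str.len s - L := by omega
    rw [PySem.List.slice_to cs (by omega), List.take_of_length_le (by omega)]
    apply beq_eq_false_iff_ne.mpr
    intro heq
    have := congrArg List.length heq
    simp at this
    omega

theorem check_invalid_eq_alt (s : String) (n : Int) (hn : n ≠ 0)
    (hnD : ¬ D_check_invalid s n) :
    check_invalid s n = check_invalid_alt s n := by
  unfold check_invalid check_invalid_alt
  by_cases hmod : PySem.Int.mod (PySem.Str.len s) n = 0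
  case neg => rw [if_pos (by simpa using hmod), if_pos (by simpa using hmod)]
  case pos =>
  rw [if_neg (by simpa using hmod), if_neg (by simpa using hmod)]
  have hmM : PySem.Str.len s = (s.toList.length : Int) := PySem.Str.len_eq s
  set cs := s.toList with hcs
  set M := cs.length with hMdef
  set L := PySem.Int.floordiv (PySem.Str.len s) n with hL
  have hLn : L * n + 0 = PySem.Str.len s := by
    rw [← hmod, hL]; exact PySem.Int.floordiv_mul_add_mod _ n
  show checkInvalidLoopA cs (PySem.List.slice cs none (some L)) L (PySem.List.pyRange 0 n 1)
      = (PySem.List.slice cs (some L) none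
          == PySem.List.slice cs none (some (PySem.Str.len s - L)))
  rcases lt_trichotomy n 0 with hneg | h0 | hpos
  · -- n < 0 and ¬D: either len = 0 or n = -1
    rw [PySem.List.pyRange_one_eq_nil (by omega), checkInvalidLoopA_eq_all]
    unfold D_check_invalid at hnD
    push Not at hnD
    by_cases hm0 : (M : Int) = 0
    · -- empty string: L = 0, everything is []
      have hL0 : L = 0 := by nlinarith
      have hnil : cs = [] := by
        have : M = 0 := by omega
        simpa [this] using List.length_eq_zero_iff.mp this
      rw [hL0, hnil]
      simp [PySem.List.slice]
    · -- n = -1, L = -len: both slices are the whole string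
      have hn1 : n = -1 := by
        rcases lt_or_ge n (-1) with h | h
        · exact absurd hmod (hnD h (by omega))
        · omega
      have hLm : L = -(PySem.Str.len s) := by rw [hn1] at hLn; omega
      have hLM : L = -(M : Int) := by omega
      rw [hLM, show -((M:Int)) = -((M:Nat) : Int) from rfl, PySem.List.slice_from_neg_natCast cs M (by omega)]
      have h2M : (0:Int) ≤ (M:Int) + (M:Int) := by positivity
      rw [show PySem.Str.len s - -(M:Int) = ((M:Int) + (M:Int)) by omega]
      rw [PySem.List.slice_to cs h2M, List.take_of_length_le (by omega),
        show cs.length - M = 0 from by omega, List.drop_zero]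
      simp
  · exact absurd h0 hn
  · -- n ≥ 1: the main periodicity argument
    have hm0 : 0 ≤ (M : Int) := by positivity
    have hL0 : 0 ≤ L := by nlinarith
    set l := L.toNat with hl
    set nn := n.toNat with hnn
    have hnn1 : 1 ≤ nn := by omega
    have hMnl : M = nn * l := by
      have : (M : Int) = ((nn * l : Nat) : Int) := by push_cast; nlinarith [Int.toNat_of_nonneg hL0, Int.toNat_of_nonneg (le_of_lt hpos)]
      exact_mod_cast this
    have hLm : L ≤ (M : Int) := by nlinarith
    rw [checkInvalidLoopA_eq_all, PySem.List.slice_to cs hL0, PySem.List.slice_from cs hL0,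
      PySem.List.slice_to cs (by omega)]
    have htn : (PySem.Str.len s - L).toNat = M - l := by omega
    rw [htn]
    have hslice : ∀ i : Int, 0 ≤ i → i < n →
        PySem.List.slice cs (some (i * L)) (some ((i + 1) * L))
          = (cs.drop (i.toNat * l)).take l := by
      intro i h0 h1
      rw [PySem.List.slice_toNat cs (by positivity) (by positivity)]
      rw [Int.toNat_mul h0 hL0, Int.toNat_mul (by omega) hL0]
      congr 1
      have : (i + 1).toNat = i.toNat + 1 := by omega
      rw [this, Nat.succ_mul]
      omega
    have hiff := chunks_iff_overlap cs l nn hMnl hnn1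
    rw [Bool.eq_iff_iff]
    simp only [List.all_eq_true, beq_iff_eq, PySem.List.mem_pyRange_one, beq_iff_eq]
    rw [← hiff]
    constructor
    · intro h i hi
      have := h (i : Int) ⟨by positivity, by omega⟩
      rw [hslice (i : Int) (by positivity) (by omega)] at this
      simpa using this.symm
    · intro h i hi
      rw [hslice i hi.1 hi.2]
      have := h i.toNat (by omega)
      rw [this]

-- ===== VERDICT (by name: the statement is the Claim_ definition above) =====
theorem check_invalid_spec : Claim_unchanged_check_invalid := by
  intro s n _hDom hPre hnD
  exact check_invalid_eq_alt s n hPre hnD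

theorem check_invalid_changed : Claim_changed_check_invalid := by
  unfold Claim_changed_check_invalid; decide

theorem check_invalid_tight : Claim_exact_check_invalid := by
  intro s n _hDom _hPre hD
  obtain ⟨hA, hB⟩ := check_invalid_ne_alt_on_D s n hD
  rw [hA, hB]; decide
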